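-- pv_equiv track=rewrite | github.com/fragfutter/AdventOfCode | 2020/10.py | slicer
-- ===== SOURCE A (Python) =====
-- def slicer(data):
--     """split a list of adapters at 3V gaps into smaller lists"""
--     data = sorted(data[:])  # make a copy we modify it
--     s = [data.pop(0)]  # starting value
--     while data:
--         v = data.pop(0)
--         if v - s[-1] == 3:
--             yield s
--             s = [v]  # start next
--         else:
--             s.append(v)
--     yield s  # final
-- ===== SOURCE B (Python) =====
-- def slicer(data):
--     """split a list of adapters at 3V gaps into smaller lists"""
--     s = sorted(data)
--     cuts = [i for i, (a, b) in enumerate(zip(s, s[1:]), 1) if b - a == 3]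
--     for start, end in zip([0] + cuts, cuts + [len(s)]):
--         yield s[start:end]
-- ===== Notes on version B (the rewrite author's own statement) =====
-- stated objective: faster
-- what changed: Replaces A's destructive pop(0)/append/flush loop with a build-boundaries-then-slice decomposition: one pass over adjacent pairs collects the 3-gap cut indices, then each group is produced as a slice between consecutive boundaries.
import Mathlib
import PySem

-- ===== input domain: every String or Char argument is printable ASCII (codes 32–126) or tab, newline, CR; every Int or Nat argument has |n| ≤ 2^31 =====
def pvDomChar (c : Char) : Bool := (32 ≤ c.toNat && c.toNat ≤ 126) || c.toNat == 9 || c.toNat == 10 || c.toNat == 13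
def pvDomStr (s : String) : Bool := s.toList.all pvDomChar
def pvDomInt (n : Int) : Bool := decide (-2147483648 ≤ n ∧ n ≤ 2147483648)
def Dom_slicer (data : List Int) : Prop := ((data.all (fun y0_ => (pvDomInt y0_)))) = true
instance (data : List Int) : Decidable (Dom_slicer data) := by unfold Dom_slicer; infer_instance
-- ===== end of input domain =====

-- B replaces A's pop(0)/append/flush loop by "collect 3-gap cut indices, then slice between
-- consecutive boundaries"; a timing run decides the speed label (A shifts the list on every pop(0)).

-- ===== PORT A =====
-- the while-loop of A: rest = remaining data, s = current group, acc = groups yielded so far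
def slicerLoopA (rest : List Int) (s : List Int) (acc : List (List Int)) : List (List Int) :=
  match rest with
  | [] => acc ++ [s]                      -- 'yield s  # final'
  | v :: rest' =>
    -- s is never empty in A, so s[-1] is always defined; .getD 0 is never taken
    if v - (PySem.List.pyGet? s (-1)).getD 0 = 3 then
      slicerLoopA rest' [v] (acc ++ [s])  -- 'yield s; s = [v]'
    else
      slicerLoopA rest' (s ++ [v]) acc    -- 's.append(v)'

def slicer (data : List Int) : List (List Int) :=
  match PySem.List.sorted data (fun x => x) false with
  | [] => []                              -- data.pop(0) raises IndexError here (outside Pre_)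
  | h :: t => slicerLoopA t [h] []        -- 's = [data.pop(0)]' then the while loop

-- ===== PORT B =====
def slicer_alt (data : List Int) : List (List Int) :=
  let s := PySem.List.sorted data (fun x => x) false
  -- cuts = [i for i, (a, b) in enumerate(zip(s, s[1:]), 1) if b - a == 3]
  let cuts := ((PySem.List.enumerate (s.zip (PySem.List.slice s (some 1) none)) 1).filter
      (fun p => p.2.2 - p.2.1 == 3)).map (fun p => p.1)
  -- for start, end in zip([0] + cuts, cuts + [len(s)]): yield s[start:end]
  (((0 : Int) :: cuts).zip (cuts ++ [(s.length : Int)])).map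
    (fun p => PySem.List.slice s (some p.1) (some p.2))

-- ===== PRECONDITION & SPEC =====
-- A raises IndexError (data.pop(0)) exactly on the empty list; that is all Pre_ excludes.
def Pre_slicer (data : List Int) : Prop := data ≠ []
instance (data : List Int) : Decidable (Pre_slicer data) := by unfold Pre_slicer; infer_instance
def pvWitness_slicer : List Int := ([1, 2, 7])

def Spec_slicer (data : List Int) (out : List (List Int)) : Prop := out = slicer_alt data
instance (data : List Int) (out : List (List Int)) : Decidable (Spec_slicer data out) := by unfold Spec_slicer; infer_instance

-- ===== CLAIM (what is proved, stated in full; the proofs are below) =====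
def Claim_equal_slicer : Prop := ∀ (data : List Int), Dom_slicer data → Pre_slicer data → Spec_slicer data (slicer data)

-- ===== LEMMAS AND PROOFS =====

-- canonical grouping of h :: t at 3-gaps (proof intermediary)
def groupsB (h : Int) : List Int → List (List Int)
  | [] => [[h]]
  | v :: t => if v - h = 3 then [h] :: groupsB v t else (groupsB v t).modifyHead (h :: ·)

-- positions i ≥ 1 (as offsets from 1) at which (h :: t) has a 3-gap
def cutsZ (h : Int) : List Int → List Int
  | [] => []
  | v :: t => if v - h = 3 then 0 :: (cutsZ v t).map (· + 1) else (cutsZ v t).map (· + 1)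

-- B's final loop as a function of the cut list
def mkGroups (s : List Int) (cuts : List Int) : List (List Int) :=
  (((0 : Int) :: cuts).zip (cuts ++ [(s.length : Int)])).map
    (fun p => PySem.List.slice s (some p.1) (some p.2))

theorem cutsZ_nonneg (h : Int) (t : List Int) : ∀ x ∈ cutsZ h t, 0 ≤ x := by
  induction t generalizing h with
  | nil => simp [cutsZ]
  | cons v t ih =>
    intro x hx
    simp only [cutsZ] at hx
    split at hx
    · rcases List.mem_cons.mp hx with rfl | hx
      · exact le_rfl
      · obtain ⟨y, hy, rfl⟩ := List.mem_map.mp hx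
        have := ih v y hy; omega
    · obtain ⟨y, hy, rfl⟩ := List.mem_map.mp hx
      have := ih v y hy; omega

-- A's loop accumulates yielded groups in front and appends into the current group
theorem slicerLoopA_eq (t : List Int) : ∀ (cur : List Int) (h : Int) (acc : List (List Int)),
    slicerLoopA t (cur ++ [h]) acc = acc ++ (groupsB h t).modifyHead (cur ++ ·) := by
  induction t with
  | nil => intro cur h acc; simp [slicerLoopA, groupsB]
  | cons v t ih =>
    intro cur h acc
    simp only [slicerLoopA, PySem.List.pyGet?_neg_one_append_singleton, Option.getD_some, groupsB]
    by_cases hv : v - h = 3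
    · rw [if_pos hv, if_pos hv]
      have hstep := ih [] v (acc ++ [cur ++ [h]])
      simp only [List.nil_append] at hstep
      rw [hstep]
      cases groupsB v t <;> simp
    · rw [if_neg hv, if_neg hv, ih (cur ++ [h]) v acc]
      cases hg : groupsB v t with
      | nil => simp
      | cons g gs => simp

-- B's comprehension computes the 3-gap positions
theorem cuts_eq (t : List Int) : ∀ (h k : Int),
    ((PySem.List.enumerate ((h :: t).zip t) k).filter
      (fun p => p.2.2 - p.2.1 == 3)).map (fun p => p.1) = (cutsZ h t).map (· + k) := by
  induction t with
  | nil => intro h k; simp [PySem.List.enumerate_nil, cutsZ]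
  | cons v t ih =>
    intro h k
    simp only [List.zip_cons_cons, PySem.List.enumerate_cons, List.filter_cons, cutsZ]
    by_cases hv : v - h = 3
    · simp only [hv, beq_self_eq_true, if_true, List.map_cons]
      rw [ih v (k + 1), List.map_map]
      congr 1
      · omega
      · apply List.map_congr_left
        intro x _
        simp only [Function.comp_apply]
        ring
    · have hb : (v - h == 3) = false := by simp [hv]
      simp only [hb, Bool.false_eq_true, if_false, if_neg hv]
      rw [ih v (k + 1), List.map_map]
      apply List.map_congr_left
      intro x _
      simp only [Function.comp_apply]
      ring

-- shifting a slice by one past a cons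
theorem slice_cons_shift (x : Int) (r : List Int) (a b : Int) (ha : 0 ≤ a) (hb : 0 ≤ b) :
    PySem.List.slice (x :: r) (some (a + 1)) (some (b + 1)) = PySem.List.slice r (some a) (some b) := by
  rw [PySem.List.slice_toNat _ (by omega) (by omega), PySem.List.slice_toNat _ ha hb]
  rw [show (b + 1).toNat - (a + 1).toNat = b.toNat - a.toNat from by omega,
    show (a + 1).toNat = a.toNat + 1 from by omega, List.drop_succ_cons]

theorem slice_cons_zero (x : Int) (r : List Int) (b : Int) (hb : 0 ≤ b) :
    PySem.List.slice (x :: r) (some 0) (some (b + 1)) = x :: PySem.List.slice r (some 0) (some b) := by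
  rw [PySem.List.slice_toNat _ (by omega) (by omega), PySem.List.slice_toNat _ (by omega) hb]
  rw [show (b + 1).toNat = b.toNat + 1 from by omega]
  simp

-- prepending an element shifts every boundary by one and prepends it to the first group
theorem mkGroups_cons (x : Int) (r : List Int) (C : List Int) (hC : ∀ e ∈ C, 0 ≤ e) :
    mkGroups (x :: r) (C.map (· + 1)) = (mkGroups r C).modifyHead (x :: ·) := by
  cases C with
  | nil =>
    simp only [mkGroups, List.map_nil, List.nil_append, List.zip_cons_cons, List.zip_nil_right,
      List.map_cons, List.map_nil, List.modifyHead]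
    have hlen : ((x :: r).length : Int) = (r.length : Int) + 1 := by simp
    rw [hlen, slice_cons_zero x r _ (by positivity)]
  | cons c1 cs =>
    have hc1 : 0 ≤ c1 := hC c1 (by simp)
    have hlen : ((x :: r).length : Int) = (r.length : Int) + 1 := by simp
    simp only [mkGroups, List.map_cons, List.cons_append, List.zip_cons_cons, List.map_cons,
      List.modifyHead]
    rw [hlen, slice_cons_zero x r c1 hc1]
    congr 1
    have hsplit : (cs.map (· + 1)) ++ [(r.length : Int) + 1] = (cs ++ [(r.length : Int)]).map (· + 1) := by
      simp
    rw [hsplit, show ((c1 + 1) :: cs.map (· + 1)) = (c1 :: cs).map (· + 1) from rfl, List.zip_map]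
    rw [List.map_map]
    apply List.map_congr_left
    intro p hp
    have hmem := List.of_mem_zip hp
    have h1 : 0 ≤ p.1 := hC _ hmem.1
    have h2 : 0 ≤ p.2 := by
      rcases List.mem_append.mp hmem.2 with hm | hm
      · exact hC _ (List.mem_cons_of_mem _ hm)
      · simp only [List.mem_singleton] at hm
        rw [hm]
        positivity
    exact slice_cons_shift x r p.1 p.2 h1 h2

-- the sliced boundaries produce exactly the canonical groups
theorem mkGroups_cutsZ (t : List Int) : ∀ (h : Int),
    mkGroups (h :: t) ((cutsZ h t).map (· + 1)) = groupsB h t := by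
  induction t with
  | nil =>
    intro h
    simp only [cutsZ, List.map_nil, mkGroups, List.nil_append, List.zip_cons_cons,
      List.zip_nil_right, List.map_cons, List.map_nil, groupsB]
    rw [show ((([h] : List Int).length : Int)) = 0 + 1 by simp]
    rw [slice_cons_zero h [] 0 le_rfl]
    rw [PySem.List.slice_toNat _ le_rfl le_rfl]
    simp
  | cons v t ih =>
    intro h
    simp only [cutsZ, groupsB]
    by_cases hv : v - h = 3
    · rw [if_pos hv, if_pos hv]
      have hC : ∀ e ∈ (0 : Int) :: (cutsZ v t).map (· + 1), 0 ≤ e := by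
        intro e he
        rcases List.mem_cons.mp he with rfl | he
        · exact le_rfl
        · obtain ⟨y, hy, rfl⟩ := List.mem_map.mp he
          have := cutsZ_nonneg v t y hy; omega
      rw [mkGroups_cons h (v :: t) _ hC]
      -- mkGroups (v :: t) (0 :: D) = [] :: mkGroups (v :: t) D
      have hsplit : mkGroups (v :: t) ((0 : Int) :: (cutsZ v t).map (· + 1))
          = PySem.List.slice (v :: t) (some 0) (some 0) :: mkGroups (v :: t) ((cutsZ v t).map (· + 1)) := by
        simp [mkGroups, List.zip_cons_cons]
      rw [hsplit, ih v]
      have h0 : PySem.List.slice (v :: t) (some (0:Int)) (some (0:Int)) = [] := by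
        rw [PySem.List.slice_toNat _ le_rfl le_rfl]; simp
      rw [h0]
      rfl
    · rw [if_neg hv, if_neg hv]
      have hC : ∀ e ∈ (cutsZ v t).map (· + 1), 0 ≤ e := by
        intro e he
        obtain ⟨y, hy, rfl⟩ := List.mem_map.mp he
        have := cutsZ_nonneg v t y hy; omega
      rw [mkGroups_cons h (v :: t) _ hC, ih v]

-- ===== VERDICT (by name: the statement is the Claim_ definition above) =====
theorem slicer_spec : Claim_equal_slicer := by
  intro data _ hpre
  unfold Spec_slicer slicer slicer_alt
  cases hs : PySem.List.sorted data (fun x => x) false with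
  | nil =>
    have hnil : data = [] := by rwa [PySem.List.sorted_eq_nil_iff] at hs
    exact absurd hnil hpre
  | cons h t =>
    dsimp only
    rw [PySem.List.slice_from_one, List.tail_cons, cuts_eq t h 1]
    have hA := slicerLoopA_eq t [] h []
    simp only [List.nil_append] at hA
    rw [hA]
    have hid : (groupsB h t).modifyHead (fun x => x) = groupsB h t := by
      cases groupsB h t <;> simp
    rw [hid]
    exact (mkGroups_cutsZ t h).symm
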